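-- pv_equiv track=rewrite | github.com/onebitebitcoin/fee | backend/app/domain/path_helpers.py | _slug_path_part
-- ===== SOURCE A (Python) =====
-- def _slug_path_part(value: str | None) -> str:
--     raw = (value or 'na').strip().lower()
--     parts = []
--     prev_dash = False
--     for char in raw:
--         if char.isalnum():
--             parts.append(char)
--             prev_dash = False
--         elif not prev_dash:
--             parts.append('-')
--             prev_dash = True
--     return ''.join(parts).strip('-') or 'na'
-- ===== SOURCE B (Python) =====
-- from itertools import groupby
--
--
-- def _slug_path_part(value):
--     raw = (value or 'na').strip().lower()
--     tokens = [''.join(g) for k, g in groupby(raw, key=str.isalnum) if k]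
--     return '-'.join(tokens) or 'na'
-- ===== Notes on version B (the rewrite author's own statement) =====
-- stated objective: idiomatic
-- what changed: Replaces the char-by-char loop with prev_dash state plus a final dash-strip by itertools.groupby on str.isalnum: the maximal alphanumeric runs become the tokens and are dash-joined, so the separator normalization and edge trimming fall out of the grouping.
import Mathlib
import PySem

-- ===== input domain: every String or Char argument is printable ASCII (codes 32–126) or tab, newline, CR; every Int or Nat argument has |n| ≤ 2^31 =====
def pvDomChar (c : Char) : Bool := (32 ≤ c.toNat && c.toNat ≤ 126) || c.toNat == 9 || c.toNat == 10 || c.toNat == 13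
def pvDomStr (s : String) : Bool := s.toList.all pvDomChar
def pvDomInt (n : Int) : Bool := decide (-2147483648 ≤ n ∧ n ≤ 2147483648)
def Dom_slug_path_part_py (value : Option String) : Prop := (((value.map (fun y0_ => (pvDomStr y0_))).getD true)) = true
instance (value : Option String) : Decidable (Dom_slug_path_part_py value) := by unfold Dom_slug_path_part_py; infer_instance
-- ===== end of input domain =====

-- B replaces A's prev_dash loop and final strip('-') by grouping the string into maximal
-- alphanumeric runs (itertools.groupby on str.isalnum) and dash-joining the runs (idiomatic).

-- ===== PORT A =====
def slug_path_part_py (value : Option String) : String :=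
  -- `(value or 'na')`: None and the empty string are falsy
  let v : String := match value with
    | none => "na"
    | some s => if s.toList = [] then "na" else s
  let raw : List Char := PySem.Chars.lower (PySem.Chars.strip v.toList)
  let st : List Char × Bool := raw.foldl
    (fun acc c =>
      if PySem.Chars.isalnum c then (acc.1 ++ [c], false)
      else if !acc.2 then (acc.1 ++ ['-'], true)
      else acc)
    ([], false)
  let res : List Char := PySem.Chars.stripChars st.1 ['-']
  if res = [] then "na" else String.mk res

-- ===== PORT B =====
-- hand-port of itertools.groupby (key = isalnum): maximal runs of chars with equal key
def pvGroupRuns : List Char → List (Bool × List Char)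
  | [] => []
  | c :: cs =>
    (PySem.Chars.isalnum c,
      c :: cs.takeWhile (fun d => PySem.Chars.isalnum d == PySem.Chars.isalnum c)) ::
      pvGroupRuns (cs.dropWhile (fun d => PySem.Chars.isalnum d == PySem.Chars.isalnum c))
termination_by cs => cs.length
decreasing_by
  simp only [List.length_cons]
  exact Nat.lt_succ_of_le (List.length_dropWhile_le _ _)

def slug_path_part_py_alt (value : Option String) : String :=
  let v : String := match value with
    | none => "na"
    | some s => if s.toList = [] then "na" else s
  let raw : List Char := PySem.Chars.lower (PySem.Chars.strip v.toList)
  let tokens : List (List Char) :=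
    (pvGroupRuns raw).filterMap (fun g => if g.1 then some g.2 else none)
  let joined : List Char := PySem.Chars.join ['-'] tokens
  if joined = [] then "na" else String.mk joined

-- ===== PRECONDITION & SPEC =====
def Spec_slug_path_part_py (value : Option String) (out : String) : Prop := out = slug_path_part_py_alt value
instance (value : Option String) (out : String) : Decidable (Spec_slug_path_part_py value out) := by unfold Spec_slug_path_part_py; infer_instance

-- ===== CLAIM (what is proved, stated in full; the proofs are below) =====
def Claim_equal_slug_path_part_py : Prop := ∀ (value : Option String), Dom_slug_path_part_py value → Spec_slug_path_part_py value (slug_path_part_py value)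

-- ===== LEMMAS AND PROOFS =====

-- A's loop, output chars only / final prev_dash flag
def pvF : Bool → List Char → List Char
  | _, [] => []
  | b, c :: cs =>
    if PySem.Chars.isalnum c then c :: pvF false cs
    else if b then pvF true cs else '-' :: pvF true cs

def pvB : Bool → List Char → Bool
  | b, [] => b
  | _, c :: cs => if PySem.Chars.isalnum c then pvB false cs else pvB true cs

def pvP (c : Char) : Bool := List.contains ['-'] c

def pvRD (xs : List Char) : List Char := (xs.reverse.dropWhile pvP).reverse

def pvT (cs : List Char) : List (List Char) :=
  (pvGroupRuns cs).filterMap (fun g => if g.1 then some g.2 else none)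

theorem pv_strip_eq (s : List Char) :
    PySem.Chars.stripChars s ['-'] = pvRD (s.dropWhile pvP) := rfl

theorem pv_foldl_eq (cs : List Char) : ∀ (acc : List Char) (b : Bool),
    cs.foldl
      (fun acc c =>
        if PySem.Chars.isalnum c then (acc.1 ++ [c], false)
        else if !acc.2 then (acc.1 ++ ['-'], true)
        else acc)
      (acc, b) = (acc ++ pvF b cs, pvB b cs) := by
  induction cs with
  | nil => intro acc b; simp [pvF, pvB]
  | cons c cs ih =>
    intro acc b
    rw [List.foldl_cons]
    by_cases h : PySem.Chars.isalnum c = true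
    · rw [if_pos h, ih]
      simp [pvF, pvB, h]
    · cases b
      · rw [if_neg h, if_pos (by rfl), ih]
        simp [pvF, pvB, h]
      · rw [if_neg h, if_neg (by simp), ih]
        simp [pvF, pvB, h]

theorem pv_alnum_not_dash {c : Char} (h : PySem.Chars.isalnum c = true) : pvP c = false := by
  by_cases hc : c = '-'
  · subst hc; exact absurd h (by decide)
  · unfold pvP
    simp only [List.contains_cons, List.contains_nil, Bool.or_false, beq_eq_false_iff_ne]
    exact hc

-- pvF true never starts with a dash
theorem pv_true_no_lead : ∀ cs : List Char, (pvF true cs).dropWhile pvP = pvF true cs := by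
  intro cs
  induction cs with
  | nil => simp [pvF]
  | cons c cs ih =>
    by_cases h : PySem.Chars.isalnum c = true
    · simp [pvF, h, List.dropWhile, pv_alnum_not_dash h]
    · simp [pvF, h, ih]

-- pvF true skips a non-alnum prefix
theorem pv_true_skip : ∀ cs : List Char,
    pvF true cs = pvF true (cs.dropWhile (fun d => !PySem.Chars.isalnum d)) := by
  intro cs
  induction cs with
  | nil => simp
  | cons c cs ih =>
    by_cases h : PySem.Chars.isalnum c = true
    · simp [List.dropWhile, h]
    · simp [pvF, List.dropWhile, h, ih]

theorem pv_false_drop : ∀ cs : List Char, (pvF false cs).dropWhile pvP = pvF true cs := by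
  intro cs
  cases cs with
  | nil => simp [pvF]
  | cons c cs =>
    by_cases h : PySem.Chars.isalnum c = true
    · simp [pvF, h, List.dropWhile, pv_alnum_not_dash h]
    · have hp : pvP '-' = true := by decide
      simp [pvF, h, List.dropWhile, hp, pv_true_no_lead]

-- pvF false emits a leading alnum run verbatim
theorem pv_false_run : ∀ cs : List Char,
    pvF false cs = cs.takeWhile PySem.Chars.isalnum ++ pvF false (cs.dropWhile PySem.Chars.isalnum) := by
  intro cs
  induction cs with
  | nil => simp [pvF]
  | cons c cs ih =>
    by_cases h : PySem.Chars.isalnum c = true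
    · simp [pvF, h, List.takeWhile, List.dropWhile, ih]
    · simp [List.takeWhile, List.dropWhile, h]

theorem pv_rd_append (xs ys : List Char) :
    pvRD (xs ++ ys) = if pvRD ys = [] then pvRD xs else xs ++ pvRD ys := by
  by_cases hz : ys.reverse.dropWhile pvP = []
  · simp [pvRD, List.reverse_append, List.dropWhile_append, hz]
  · simp [pvRD, List.reverse_append, List.dropWhile_append, hz]

theorem pv_rd_no_dash {xs : List Char} (h : ∀ c ∈ xs, pvP c = false) : pvRD xs = xs := by
  have h2 : xs.reverse.dropWhile pvP = xs.reverse := by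
    rw [List.dropWhile_eq_self_iff]
    intro hl hp
    have hmem : xs.reverse[0] ∈ xs := List.mem_reverse.mp (List.getElem_mem hl)
    rw [h _ hmem] at hp
    cases hp
  unfold pvRD
  rw [h2, List.reverse_reverse]

theorem pv_T_nil : pvT [] = [] := by simp [pvT, pvGroupRuns]

theorem pv_T_cons_false {c : Char} (cs : List Char) (h : ¬ PySem.Chars.isalnum c = true) :
    pvT (c :: cs) = pvT (cs.dropWhile (fun d => !PySem.Chars.isalnum d)) := by
  have hb : PySem.Chars.isalnum c = false := by simpa using h
  unfold pvT
  rw [pvGroupRuns]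
  simp [hb]

theorem pv_T_cons_true {c : Char} (cs : List Char) (h : PySem.Chars.isalnum c = true) :
    pvT (c :: cs) = (c :: cs.takeWhile PySem.Chars.isalnum) :: pvT (cs.dropWhile PySem.Chars.isalnum) := by
  unfold pvT
  rw [pvGroupRuns]
  simp [h]

theorem pv_groupruns_ne (cs : List Char) : ∀ g ∈ pvGroupRuns cs, g.2 ≠ [] := by
  induction cs using pvGroupRuns.induct with
  | case1 => simp [pvGroupRuns]
  | case2 c cs ih =>
    rw [pvGroupRuns]
    intro g hg
    rcases List.mem_cons.mp hg with hg | hg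
    · subst hg; simp
    · exact ih g hg

theorem pv_T_nonempty (cs : List Char) : ∀ g ∈ pvT cs, g ≠ [] := by
  intro g hg
  rcases List.mem_filterMap.mp hg with ⟨a, ha, hfa⟩
  by_cases h1 : a.1 = true
  · simp only [h1, if_true, Option.some.injEq] at hfa
    subst hfa
    exact pv_groupruns_ne cs a ha
  · simp [h1] at hfa

theorem pv_join_cons (t : List Char) (ts : List (List Char)) :
    PySem.Chars.join ['-'] (t :: ts) =
      t ++ (if ts = [] then [] else '-' :: PySem.Chars.join ['-'] ts) := by
  cases ts with
  | nil => simp [PySem.Chars.join, List.intercalate]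
  | cons u us => simp [PySem.Chars.join, List.intercalate, List.intersperse]

theorem pv_join_nil_iff {ts : List (List Char)} (h : ∀ g ∈ ts, g ≠ []) :
    (PySem.Chars.join ['-'] ts = [] ↔ ts = []) := by
  cases ts with
  | nil => simp [PySem.Chars.join, List.intercalate]
  | cons t us =>
    rw [pv_join_cons]
    constructor
    · intro he
      rcases List.append_eq_nil_iff.mp he with ⟨ht, _⟩
      exact absurd ht (h t (by simp))
    · intro hc; exact absurd hc (by simp)

-- main invariant: the dash-stripped loop output is the dash-join of the alnum runs
theorem pv_main : ∀ (n : ℕ) (cs : List Char), cs.length ≤ n →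
    pvRD (pvF true cs) = PySem.Chars.join ['-'] (pvT cs) := by
  intro n
  induction n with
  | zero =>
    intro cs h
    have hnil : cs = [] := List.eq_nil_of_length_eq_zero (Nat.le_zero.mp h)
    subst hnil
    simp [pvF, pv_T_nil, pvRD, PySem.Chars.join, List.intercalate]
  | succ n ih =>
    intro cs hlen
    cases cs with
    | nil => simp [pvF, pv_T_nil, pvRD, PySem.Chars.join, List.intercalate]
    | cons c cs =>
      have hcs : cs.length ≤ n := Nat.lt_succ_iff.mp (by simpa using hlen)
      by_cases h : PySem.Chars.isalnum c = true
      · -- alnum head: emit the run, recurse past it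
        rw [pv_T_cons_true cs h]
        have hstep : pvF true (c :: cs) = c :: pvF false cs := by simp [pvF, h]
        rw [hstep, pv_false_run cs]
        have hrunall : ∀ d ∈ (c :: cs.takeWhile PySem.Chars.isalnum), pvP d = false := by
          intro d hd
          rcases List.mem_cons.mp hd with hd | hd
          · subst hd; exact pv_alnum_not_dash h
          · exact pv_alnum_not_dash (List.mem_takeWhile_imp hd)
        rw [show (c :: (cs.takeWhile PySem.Chars.isalnum ++ pvF false (cs.dropWhile PySem.Chars.isalnum)))
              = (c :: cs.takeWhile PySem.Chars.isalnum) ++ pvF false (cs.dropWhile PySem.Chars.isalnum) from rfl]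
        rw [pv_rd_append, pv_rd_no_dash hrunall, pv_join_cons]
        have hdashF : pvRD (pvF false (cs.dropWhile PySem.Chars.isalnum)) =
            if pvT (cs.dropWhile PySem.Chars.isalnum) = [] then []
            else '-' :: PySem.Chars.join ['-'] (pvT (cs.dropWhile PySem.Chars.isalnum)) := by
          rcases hres : cs.dropWhile PySem.Chars.isalnum with _ | ⟨d, r2⟩
          · simp [pvF, pvRD, pv_T_nil]
          · have hd : PySem.Chars.isalnum d = false := by
              have hh := List.head?_dropWhile_not PySem.Chars.isalnum cs
              rw [hres] at hh
              simpa using hh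
            have hF : pvF false (d :: r2) = '-' :: pvF true r2 := by simp [pvF, hd]
            have hT : pvT (d :: r2) = pvT (r2.dropWhile (fun x => !PySem.Chars.isalnum x)) :=
              pv_T_cons_false r2 (by simp [hd])
            have hlen2 : (r2.dropWhile (fun x => !PySem.Chars.isalnum x)).length ≤ n := by
              calc (r2.dropWhile (fun x => !PySem.Chars.isalnum x)).length
                  ≤ r2.length := List.length_dropWhile_le _ _
                _ ≤ (d :: r2).length := Nat.le_succ _
                _ ≤ cs.length := by rw [← hres]; exact List.length_dropWhile_le _ _
                _ ≤ n := hcs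
            have hIH := ih _ hlen2
            rw [hF, pv_true_skip r2,
              show ('-' :: pvF true (r2.dropWhile (fun x => !PySem.Chars.isalnum x)))
                = ['-'] ++ pvF true (r2.dropWhile (fun x => !PySem.Chars.isalnum x)) from rfl,
              pv_rd_append, hIH, hT]
            have hrdd : pvRD ['-'] = [] := by decide
            by_cases hz : pvT (r2.dropWhile (fun x => !PySem.Chars.isalnum x)) = []
            · simp [hz, hrdd, PySem.Chars.join, List.intercalate]
            · rw [if_neg ((not_iff_not.mpr (pv_join_nil_iff (pv_T_nonempty _))).mpr hz), if_neg hz]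
              rfl
        rw [hdashF]
        by_cases hz : pvT (cs.dropWhile PySem.Chars.isalnum) = []
        · simp [hz]
        · simp [hz]
      · -- non-alnum head: both sides skip the non-alnum prefix
        have hstep : pvF true (c :: cs) = pvF true cs := by simp [pvF, h]
        rw [hstep, pv_T_cons_false cs h, pv_true_skip cs]
        exact ih _ (le_trans (List.length_dropWhile_le _ _) hcs)

theorem pv_main' (cs : List Char) :
    pvRD (pvF true cs) = PySem.Chars.join ['-'] (pvT cs) :=
  pv_main cs.length cs (le_refl _)

-- ===== VERDICT (by name: the statement is the Claim_ definition above) =====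
theorem slug_path_part_py_spec : Claim_equal_slug_path_part_py := by
  intro value _
  unfold Spec_slug_path_part_py slug_path_part_py slug_path_part_py_alt
  simp only
  rw [pv_foldl_eq]
  simp only [List.nil_append]
  rw [pv_strip_eq, pv_false_drop, pv_main']
  rfl
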